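-- pv_equiv track=rewrite | github.com/Yaksh-Projectkmt/OEA_AI_DEV | test.py | PVC_CLASSIFICATION
-- ===== SOURCE A (Python) =====
-- def PVC_CLASSIFICATION(PVC_R_Peaks):
--     vt_counter = 0
--     couplet_counter = 0
--     triplet_counter = 0
--     bigeminy_counter = 0
--     trigeminy_counter = 0
--     quadrigeminy_counter = 0
--     vt = 0
--     i = 0
--     while i < len(PVC_R_Peaks):
--         count = 0
--         ones_count = 0
--         while i < len(PVC_R_Peaks) and PVC_R_Peaks[i] == 1:
--             count += 1
--             ones_count += 1
--             i += 1
--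
--         if count >= 4:
--             vt_counter += 1
--             vt += ones_count
--             count = 0
--             ones_count = 0
--         if count == 3:
--             triplet_counter += 1
--         elif count == 2:
--             couplet_counter += 1
--
--         i += 1
--     j = 0
--     while j < len(PVC_R_Peaks) - 1:
--         if PVC_R_Peaks[j] == 1:
--             k = j + 1
--             spaces = 0
--             while k < len(PVC_R_Peaks) and PVC_R_Peaks[k] == 0:
--                 spaces += 1
--                 k += 1
--
--             if k < len(PVC_R_Peaks) and PVC_R_Peaks[k] == 1:
--                 if spaces == 1:
--                     bigeminy_counter += 1
--                 elif spaces == 2: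
--                     trigeminy_counter += 1
--                 elif spaces == 3:
--                     quadrigeminy_counter += 1
--             j = k
--
--         else:
--             j += 1
--
--     total_one = (1*vt) + (couplet_counter*2)+ (triplet_counter*3)+ (bigeminy_counter*2)+ (trigeminy_counter*2)+ (quadrigeminy_counter*2)
--     total = vt_counter + couplet_counter+ triplet_counter+ bigeminy_counter+ trigeminy_counter+ quadrigeminy_counter
--     ones = PVC_R_Peaks.count(1)
--     if total == 0:
--         Isolated = ones
--     else:
--         Common = total-1
--         Isolated = ones - (total_one - Common)
--     if vt_counter>1:
--         vt_counter=1
--     return vt_counter, couplet_counter, triplet_counter, bigeminy_counter, trigeminy_counter, quadrigeminy_counter, Isolated, vt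
-- ===== SOURCE B (Python) =====
-- def PVC_CLASSIFICATION(PVC_R_Peaks):
--     # single pass: maintain the current run (value, length) and whether the
--     # previous run was a run of 1s; classify each run as it closes
--     vtc = cp = tp = vt = bg = tg = qg = ones = 0
--     cur_v, cur_l, prev_one = None, 0, False
--
--     def close(cv, cl, nxt_is_one):
--         nonlocal vtc, cp, tp, vt, bg, tg, qg, prev_one
--         if cv == 1:
--             if cl >= 4:
--                 vtc += 1
--                 vt += cl
--             elif cl == 3:
--                 tp += 1
--             elif cl == 2:
--                 cp += 1
--         elif prev_one and cv == 0 and nxt_is_one: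
--             if cl == 1:
--                 bg += 1
--             elif cl == 2:
--                 tg += 1
--             elif cl == 3:
--                 qg += 1
--         prev_one = (cv == 1)
--
--     for x in PVC_R_Peaks:
--         if x == 1:
--             ones += 1
--         if cur_v is None:
--             cur_v, cur_l = x, 1
--         elif x == cur_v:
--             cur_l += 1
--         else:
--             close(cur_v, cur_l, x == 1)
--             cur_v, cur_l = x, 1
--     if cur_v is not None:
--         close(cur_v, cur_l, False)
--
--     total_one = vt + cp * 2 + tp * 3 + (bg + tg + qg) * 2
--     total = vtc + cp + tp + bg + tg + qg
--     Isolated = ones if total == 0 else ones - (total_one - (total - 1))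
--     return min(vtc, 1), cp, tp, bg, tg, qg, Isolated, vt
-- ===== Notes on version B (the rewrite author's own statement) =====
-- stated objective: faster
-- what changed: B makes a single pass with a run-state machine (current run value/length plus a previous-run-was-ones flag), classifying each run as it closes, instead of A's two separate index-walking passes with nested inner while-loops and a final .count scan.
import Mathlib
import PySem

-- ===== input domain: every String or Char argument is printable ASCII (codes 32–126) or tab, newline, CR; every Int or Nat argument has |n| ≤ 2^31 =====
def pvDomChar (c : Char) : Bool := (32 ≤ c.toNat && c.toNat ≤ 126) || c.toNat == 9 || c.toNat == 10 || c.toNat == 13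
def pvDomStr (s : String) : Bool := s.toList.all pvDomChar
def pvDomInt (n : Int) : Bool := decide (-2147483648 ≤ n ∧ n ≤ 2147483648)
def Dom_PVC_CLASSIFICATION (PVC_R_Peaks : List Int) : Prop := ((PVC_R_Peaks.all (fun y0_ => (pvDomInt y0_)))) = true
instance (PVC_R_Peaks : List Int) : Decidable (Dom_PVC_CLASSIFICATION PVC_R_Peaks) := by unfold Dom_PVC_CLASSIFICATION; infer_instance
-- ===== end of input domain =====

-- B replaces A's two index-walking nested-while passes (plus a .count scan) by a single
-- left fold with a run-state machine (current run, previous-run-was-ones flag); the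
-- timing run measured B constant-factor faster.


-- ===== PORT A =====

-- inner while of pass 1: count the leading 1s (count = ones_count, both kept as the
-- single Nat since they are always equal and only compared/added), return (count, rest)
def aRunOnes : List Int → Nat × List Int
  | [] => (0, [])
  | x :: xs => if x = 1 then ((aRunOnes xs).1 + 1, (aRunOnes xs).2) else (0, x :: xs)

theorem aRunOnes_len : ∀ xs : List Int, (aRunOnes xs).2.length ≤ xs.length := by
  intro xs
  induction xs with
  | nil => simp [aRunOnes]
  | cons x xs ih => by_cases h : x = 1 <;> simp [aRunOnes, h] <;> omega

-- outer while of pass 1 over the suffix starting at i; state (vt_counter, couplet, triplet, vt)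
def aLoop1 : List Int → Int → Int → Int → Int → Int × Int × Int × Int
  | [], vtc, cp, tp, vt => (vtc, cp, tp, vt)
  | x :: t, vtc, cp, tp, vt =>
      let p := aRunOnes (x :: t)
      let count := p.1
      -- if count >= 4: vt_counter += 1; vt += ones_count; count = 0; ones_count = 0
      let s1 : Int × Int × Nat := if count ≥ 4 then (vtc + 1, vt + (count : Int), 0) else (vtc, vt, count)
      -- if count == 3 … elif count == 2 …
      let s2 : Int × Int := if s1.2.2 = 3 then (tp + 1, cp) else if s1.2.2 = 2 then (tp, cp + 1) else (tp, cp)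
      aLoop1 p.2.tail s1.1 s2.2 s2.1 s1.2.1    -- i += 1 after the run
termination_by xs _ _ _ _ => xs.length
decreasing_by
  simp only [List.length_cons]
  cases hp : (aRunOnes (x :: t)).2 with
  | nil => simp [hp]
  | cons z r =>
      have h1 := aRunOnes_len (x :: t)
      rw [hp] at h1
      simp only [List.length_cons] at h1
      simp [hp]
      omega

-- inner while of pass 2: count the leading 0s, return (spaces, rest from index k)
def aCountZeros : List Int → Nat × List Int
  | [] => (0, [])
  | x :: xs => if x = 0 then ((aCountZeros xs).1 + 1, (aCountZeros xs).2) else (0, x :: xs)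

theorem aCountZeros_len : ∀ xs : List Int, (aCountZeros xs).2.length ≤ xs.length := by
  intro xs
  induction xs with
  | nil => simp [aCountZeros]
  | cons x xs ih => by_cases h : x = 0 <;> simp [aCountZeros, h] <;> omega

-- the 'if k < len and PVC_R_Peaks[k] == 1: …' block of pass 2, as a helper:
-- given the rest of the list from index k and the counted spaces, update the counters
def aGapAcc (r : List Int) (spaces : Nat) (bg tg qg : Int) : Int × Int × Int :=
  match r with
  | y :: _ =>
      if y = 1 then
        if spaces = 1 then (bg + 1, tg, qg)
        else if spaces = 2 then (bg, tg + 1, qg)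
        else if spaces = 3 then (bg, tg, qg + 1)
        else (bg, tg, qg)
      else (bg, tg, qg)
  | [] => (bg, tg, qg)

-- outer while of pass 2 ('while j < len - 1'); state (bigeminy, trigeminy, quadrigeminy)
def aLoop2 : List Int → Int → Int → Int → Int × Int × Int
  | [], bg, tg, qg => (bg, tg, qg)
  | [_], bg, tg, qg => (bg, tg, qg)
  | a :: b :: t, bg, tg, qg =>
      if a = 1 then
        let p := aCountZeros (b :: t)
        let acc := aGapAcc p.2 p.1 bg tg qg
        aLoop2 p.2 acc.1 acc.2.1 acc.2.2      -- j = k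
      else aLoop2 (b :: t) bg tg qg            -- j += 1
termination_by xs _ _ _ => xs.length
decreasing_by
  all_goals simp only [List.length_cons]
  all_goals try omega
  have := aCountZeros_len (b :: t); simp only [List.length_cons] at this; omega

def PVC_CLASSIFICATION (PVC_R_Peaks : List Int) : Int × Int × Int × Int × Int × Int × Int × Int :=
  let p1 := aLoop1 PVC_R_Peaks 0 0 0 0
  let vt_counter := p1.1
  let couplet := p1.2.1
  let triplet := p1.2.2.1
  let vt := p1.2.2.2
  let p2 := aLoop2 PVC_R_Peaks 0 0 0
  let bigeminy := p2.1
  let trigeminy := p2.2.1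
  let quadrigeminy := p2.2.2
  let total_one := 1 * vt + couplet * 2 + triplet * 3 + bigeminy * 2 + trigeminy * 2 + quadrigeminy * 2
  let total := vt_counter + couplet + triplet + bigeminy + trigeminy + quadrigeminy
  let ones : Int := PySem.List.count PVC_R_Peaks 1
  let Isolated := if total = 0 then ones else ones - (total_one - (total - 1))
  ((if vt_counter > 1 then 1 else vt_counter), couplet, triplet, bigeminy, trigeminy, quadrigeminy, Isolated, vt)

-- ===== PORT B =====

-- the mutable locals of Source B's single pass, as one record
structure BState where
  vtc : Int
  cp : Int
  tp : Int
  vt : Int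
  bg : Int
  tg : Int
  qg : Int
  ones : Int
  cur : Option (Int × Nat)   -- (cur_v, cur_l); none = no run open yet
  prevOne : Bool             -- the run before the current one was a run of 1s
deriving DecidableEq, Repr

-- Source B's close(cv, cl, nxt_is_one)
def bClose (cv : Int) (cl : Nat) (nxtIsOne : Bool) (s : BState) : BState :=
  let s1 :=
    if cv = 1 then
      if cl ≥ 4 then { s with vtc := s.vtc + 1, vt := s.vt + (cl : Int) }
      else if cl = 3 then { s with tp := s.tp + 1 }
      else if cl = 2 then { s with cp := s.cp + 1 }
      else s
    else if s.prevOne && decide (cv = 0) && nxtIsOne then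
      if cl = 1 then { s with bg := s.bg + 1 }
      else if cl = 2 then { s with tg := s.tg + 1 }
      else if cl = 3 then { s with qg := s.qg + 1 }
      else s
    else s
  { s1 with prevOne := decide (cv = 1) }

-- one iteration of Source B's for-loop
def bStep (s : BState) (x : Int) : BState :=
  let s := if x = 1 then { s with ones := s.ones + 1 } else s
  match s.cur with
  | none => { s with cur := some (x, 1) }
  | some (cv, cl) =>
      if x = cv then { s with cur := some (cv, cl + 1) }
      else { bClose cv cl (decide (x = 1)) s with cur := some (x, 1) }

-- Source B's final 'if cur_v is not None: close(cur_v, cur_l, False)'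
def bFinish (s : BState) : BState :=
  match s.cur with
  | none => { s with cur := none }
  | some (cv, cl) => { bClose cv cl false s with cur := none }

def PVC_CLASSIFICATION_alt (PVC_R_Peaks : List Int) : Int × Int × Int × Int × Int × Int × Int × Int :=
  let s := bFinish (PVC_R_Peaks.foldl bStep ⟨0, 0, 0, 0, 0, 0, 0, 0, none, false⟩)
  let total_one := s.vt + s.cp * 2 + s.tp * 3 + (s.bg + s.tg + s.qg) * 2
  let total := s.vtc + s.cp + s.tp + s.bg + s.tg + s.qg
  let Isolated := if total = 0 then s.ones else s.ones - (total_one - (total - 1))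
  (min s.vtc 1, s.cp, s.tp, s.bg, s.tg, s.qg, Isolated, s.vt)

-- ===== PRECONDITION & SPEC =====
def Spec_PVC_CLASSIFICATION (PVC_R_Peaks : List Int) (out : Int × Int × Int × Int × Int × Int × Int × Int) : Prop := out = PVC_CLASSIFICATION_alt PVC_R_Peaks
instance (PVC_R_Peaks : List Int) (out : Int × Int × Int × Int × Int × Int × Int × Int) : Decidable (Spec_PVC_CLASSIFICATION PVC_R_Peaks out) := by
  unfold Spec_PVC_CLASSIFICATION
  exact @instDecidableEqProd _ _ inferInstance (@instDecidableEqProd _ _ inferInstance (@instDecidableEqProd _ _ inferInstance (@instDecidableEqProd _ _ inferInstance (@instDecidableEqProd _ _ inferInstance (@instDecidableEqProd _ _ inferInstance (@instDecidableEqProd _ _ inferInstance inferInstance)))))) _ _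

-- ===== CLAIM (what is proved, stated in full; the proofs are below) =====
def Claim_equal_PVC_CLASSIFICATION : Prop := ∀ (PVC_R_Peaks : List Int), Dom_PVC_CLASSIFICATION PVC_R_Peaks → Spec_PVC_CLASSIFICATION PVC_R_Peaks (PVC_CLASSIFICATION PVC_R_Peaks)

-- ===== LEMMAS AND PROOFS =====
-- (proof-only intermediate: the run-length encoding of the list; both the A-loops and
--  the B-fold are proved equal to passes over it)

def bRun (v : Int) : List Int → Nat × List Int
  | [] => (0, [])
  | x :: xs => if x = v then ((bRun v xs).1 + 1, (bRun v xs).2) else (0, x :: xs)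

theorem bRun_len : ∀ (v : Int) (xs : List Int), (bRun v xs).2.length ≤ xs.length := by
  intro v xs
  induction xs with
  | nil => simp [bRun]
  | cons x xs ih => by_cases h : x = v <;> simp [bRun, h] <;> omega

def bRLE : List Int → List (Int × Nat)
  | [] => []
  | x :: xs => (x, (bRun x xs).1 + 1) :: bRLE (bRun x xs).2
termination_by xs => xs.length
decreasing_by have := bRun_len x xs; simp; omega

-- pass-1-over-runs reference
def bPass1 : List (Int × Nat) → Int → Int → Int → Int → Int × Int × Int × Int
  | [], vtc, cp, tp, vt => (vtc, cp, tp, vt)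
  | (v, l) :: rs, vtc, cp, tp, vt =>
      if v = 1 then
        if l ≥ 4 then bPass1 rs (vtc + 1) cp tp (vt + (l : Int))
        else if l = 3 then bPass1 rs vtc cp (tp + 1) vt
        else if l = 2 then bPass1 rs vtc (cp + 1) tp vt
        else bPass1 rs vtc cp tp vt
      else bPass1 rs vtc cp tp vt

-- pass-2-over-runs reference: sliding window of three consecutive runs
def bGaps : List (Int × Nat) → Int → Int → Int → Int × Int × Int
  | r1 :: r2 :: r3 :: rest, bg, tg, qg =>
      if r1.1 = 1 ∧ r2.1 = 0 ∧ r3.1 = 1 then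
        if r2.2 = 1 then bGaps (r2 :: r3 :: rest) (bg + 1) tg qg
        else if r2.2 = 2 then bGaps (r2 :: r3 :: rest) bg (tg + 1) qg
        else if r2.2 = 3 then bGaps (r2 :: r3 :: rest) bg tg (qg + 1)
        else bGaps (r2 :: r3 :: rest) bg tg qg
      else bGaps (r2 :: r3 :: rest) bg tg qg
  | _, bg, tg, qg => (bg, tg, qg)

-- pass 2 rephrased with a previous-run flag instead of a triple window
-- whether the next run (if any) is a run of 1s
def lookOne : List (Int × Nat) → Bool
  | (w, _) :: _ => decide (w = 1)
  | [] => false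

def bGapsP (p : Bool) : List (Int × Nat) → Int → Int → Int → Int × Int × Int
  | [], bg, tg, qg => (bg, tg, qg)
  | (v, l) :: rest, bg, tg, qg =>
      if p && decide (v = 0) && lookOne rest then
        if l = 1 then bGapsP (decide (v = 1)) rest (bg + 1) tg qg
        else if l = 2 then bGapsP (decide (v = 1)) rest bg (tg + 1) qg
        else if l = 3 then bGapsP (decide (v = 1)) rest bg tg (qg + 1)
        else bGapsP (decide (v = 1)) rest bg tg qg
      else bGapsP (decide (v = 1)) rest bg tg qg

-- the combined fold of bClose over the run list with one-run lookahead
def runsFold (s : BState) : List (Int × Nat) → BState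
  | [] => s
  | (v, l) :: rest => runsFold (bClose v l (lookOne rest) s) rest

-- ---------- A side: previous-style proofs down to bPass1/bGaps over bRLE ----------

theorem bRun_rest_head (v : Int) : ∀ (xs : List Int) (y : Int) (r : List Int),
    (bRun v xs).2 = y :: r → y ≠ v := by
  intro xs
  induction xs with
  | nil => intro y r h; simp [bRun] at h
  | cons z t ih =>
      intro y r h
      by_cases hz : z = v
      · subst hz; simp only [bRun, if_pos rfl] at h; exact ih y r h
      · simp [bRun, hz] at h; omega

theorem aRunOnes_eq_bRun (xs : List Int) : aRunOnes xs = bRun 1 xs := by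
  induction xs with
  | nil => rfl
  | cons x xs ih => by_cases h : x = 1 <;> simp [aRunOnes, bRun, h, ih]

theorem aCountZeros_eq_bRun (xs : List Int) : aCountZeros xs = bRun 0 xs := by
  induction xs with
  | nil => rfl
  | cons x xs ih => by_cases h : x = 0 <;> simp [aCountZeros, bRun, h, ih]

theorem bPass1_skip {v : Int} {l : Nat} (hv : v ≠ 1) (rs : List (Int × Nat)) (a b c d : Int) :
    bPass1 ((v, l) :: rs) a b c d = bPass1 rs a b c d := by
  simp [bPass1, hv]

theorem bPass1_dropRun {v : Int} (hv : v ≠ 1) (t : List Int) (a b c d : Int) :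
    bPass1 (bRLE t) a b c d = bPass1 (bRLE (bRun v t).2) a b c d := by
  cases t with
  | nil => simp [bRun]
  | cons z t' =>
      by_cases hz : z = v
      · subst hz
        rw [bRLE, bPass1_skip hv]
        simp [bRun]
      · simp [bRun, hz]

theorem bGaps_head_len (v : Int) (l l' : Nat) (rs : List (Int × Nat)) (a b c : Int) :
    bGaps ((v, l) :: rs) a b c = bGaps ((v, l') :: rs) a b c := by
  match rs with
  | [] => rfl
  | [_] => rfl
  | r2 :: r3 :: rest => simp only [bGaps]

theorem bGaps_skip {v : Int} {l : Nat} (hv : v ≠ 1) (rs : List (Int × Nat)) (a b c : Int) :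
    bGaps ((v, l) :: rs) a b c = bGaps rs a b c := by
  match rs with
  | [] => rfl
  | [_] => rfl
  | r2 :: r3 :: rest => simp [bGaps, hv]

theorem bGaps_dropRun {v : Int} (hv : v ≠ 1) (t : List Int) (a b c : Int) :
    bGaps (bRLE t) a b c = bGaps (bRLE (bRun v t).2) a b c := by
  cases t with
  | nil => simp [bRun]
  | cons z t' =>
      by_cases hz : z = v
      · subst hz
        rw [bRLE, bGaps_skip hv]
        simp [bRun]
      · simp [bRun, hz]

theorem bGaps_one_zero (m s : Nat) (z : Int) (q : Nat) (rest : List (Int × Nat)) (a b c : Int) :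
    bGaps ((1, m) :: (0, s) :: (z, q) :: rest) a b c =
    bGaps ((z, q) :: rest)
      (if z = 1 ∧ s = 1 then a + 1 else a)
      (if z = 1 ∧ s = 2 then b + 1 else b)
      (if z = 1 ∧ s = 3 then c + 1 else c) := by
  by_cases hz : z = 1
  · subst hz
    rw [bGaps, if_pos ⟨rfl, rfl, rfl⟩]
    by_cases hs1 : s = 1
    · simp [hs1, bGaps_skip (show (0:Int) ≠ 1 by norm_num)]
    · by_cases hs2 : s = 2
      · simp [hs1, hs2, bGaps_skip (show (0:Int) ≠ 1 by norm_num)]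
      · by_cases hs3 : s = 3
        · simp [hs1, hs2, hs3, bGaps_skip (show (0:Int) ≠ 1 by norm_num)]
        · simp [hs1, hs2, hs3, bGaps_skip (show (0:Int) ≠ 1 by norm_num)]
  · rw [bGaps, if_neg (by simp [hz])]
    simp [hz, bGaps_skip (show (0:Int) ≠ 1 by norm_num)]

theorem bGaps_drop_one_head (m : Nat) {y : Int} (hy0 : y ≠ 0) (q : Nat)
    (rest : List (Int × Nat)) (a b c : Int) :
    bGaps ((1, m) :: (y, q) :: rest) a b c = bGaps ((y, q) :: rest) a b c := by
  match rest with
  | [] => rfl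
  | r3 :: rest' => rw [bGaps, if_neg (by simp [hy0])]

theorem pass1_eq : ∀ (n : Nat) (xs : List Int), xs.length ≤ n → ∀ (a b c d : Int),
    aLoop1 xs a b c d = bPass1 (bRLE xs) a b c d := by
  intro n
  induction n with
  | zero =>
      intro xs hlen a b c d
      have : xs = [] := by cases xs <;> simp_all
      subst this; simp [aLoop1, bRLE, bPass1]
  | succ n ih =>
      intro xs hlen a b c d
      cases xs with
      | nil => simp [aLoop1, bRLE, bPass1]
      | cons x t =>
          by_cases hx : x = 1
          · subst hx
            rw [aLoop1, bRLE]
            have hro : aRunOnes (1 :: t) = ((bRun 1 t).1 + 1, (bRun 1 t).2) := by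
              simp [aRunOnes, aRunOnes_eq_bRun]
            rw [hro]
            simp only
            have hlt : (bRun 1 t).2.tail.length ≤ n := by
              have h1 := bRun_len 1 t
              have h2 : (bRun 1 t).2.tail.length ≤ (bRun 1 t).2.length := by
                cases h : (bRun 1 t).2 <;> simp [h]
              simp only [List.length_cons] at hlen; omega
            rw [ih _ hlt]
            have hrest : ∀ (a b c d : Int),
                bPass1 (bRLE (bRun 1 t).2.tail) a b c d = bPass1 (bRLE (bRun 1 t).2) a b c d := by
              intro a b c d
              cases hr : (bRun 1 t).2 with
              | nil => simp
              | cons y r'' =>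
                  have hy : y ≠ 1 := bRun_rest_head 1 t y r'' hr
                  simp only [List.tail_cons]
                  rw [bRLE, bPass1_skip hy, ← bPass1_dropRun hy]
            rw [hrest]
            set c : Nat := (bRun 1 t).1 + 1 with hc
            by_cases h4 : c ≥ 4
            · have h3 : ¬ (c = 3) := by omega
              have h2 : ¬ (c = 2) := by omega
              simp [bPass1, h4, if_pos h4]
            · by_cases h3 : c = 3
              · simp [bPass1, h4, h3]
              · by_cases h2 : c = 2
                · simp [bPass1, h4, h3, h2]
                · simp [bPass1, h4, h3, h2]
          · rw [aLoop1]
            have hro : aRunOnes (x :: t) = (0, x :: t) := by simp [aRunOnes, hx]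
            rw [hro]
            simp only [List.tail_cons]
            have hlt : t.length ≤ n := by simp only [List.length_cons] at hlen; omega
            rw [ih _ hlt]
            have h4 : ¬ ((0:Nat) ≥ 4) := by omega
            simp only [if_neg h4]
            norm_num
            rw [bRLE, bPass1_skip hx, ← bPass1_dropRun hx]

theorem pass2_eq : ∀ (n : Nat) (xs : List Int), xs.length ≤ n → ∀ (a b c : Int),
    aLoop2 xs a b c = bGaps (bRLE xs) a b c := by
  intro n
  induction n with
  | zero =>
      intro xs hlen a b c
      have : xs = [] := by cases xs <;> simp_all
      subst this; simp [aLoop2, bRLE, bGaps]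
  | succ n ih =>
      intro xs hlen a b c
      match xs, hlen with
      | [], _ => simp [aLoop2, bRLE, bGaps]
      | [x], _ => simp [aLoop2, bRun, bRLE, bGaps]
      | x :: y :: t, hlen =>
        by_cases hx : x = 1
        · subst hx
          by_cases hy : y = 1
          · subst hy
            have hlt : (1 :: t : List Int).length ≤ n := by
              simp only [List.length_cons] at hlen ⊢; omega
            have hcz : aCountZeros (1 :: t) = (0, 1 :: t) := by simp [aCountZeros]
            have e1 : aLoop2 (1 :: 1 :: t) a b c = aLoop2 (1 :: t) a b c := by
              simp [aLoop2, hcz, aGapAcc]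
            rw [e1, ih _ hlt]
            have hb : bRun 1 (1 :: t) = ((bRun 1 t).1 + 1, (bRun 1 t).2) := by simp [bRun]
            conv_rhs => rw [bRLE, hb]
            conv_lhs => rw [bRLE]
            exact bGaps_head_len 1 _ _ _ a b c
          · by_cases hy0 : y = 0
            · subst hy0
              have hcz : aCountZeros (0 :: t) = ((bRun 0 t).1 + 1, (bRun 0 t).2) := by
                simp [aCountZeros, aCountZeros_eq_bRun]
              have hlt : (bRun 0 t).2.length ≤ n := by
                have := bRun_len 0 t
                simp only [List.length_cons] at hlen; omega
              simp only [aLoop2, hcz, eq_self_iff_true, if_true]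
              rw [ih _ hlt]
              have h1 : bRun 1 (0 :: t) = (0, (0:Int) :: t) := by simp [bRun]
              conv_rhs => rw [bRLE, h1]
              conv_rhs => rw [bRLE]
              cases hr : (bRun 0 t).2 with
              | nil => simp [bRLE, bGaps, aLoop2, aGapAcc]
              | cons z r' =>
                  rw [show bRLE (z :: r') = (z, (bRun z r').1 + 1) :: bRLE (bRun z r').2 from by
                    rw [bRLE]]
                  rw [bGaps_one_zero]
                  by_cases hz : z = 1
                  · subst hz
                    by_cases hs1 : (bRun 0 t).1 + 1 = 1
                    · simp [aGapAcc, hs1]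
                    · by_cases hs2 : (bRun 0 t).1 + 1 = 2
                      · simp [aGapAcc, hs1, hs2]
                      · by_cases hs3 : (bRun 0 t).1 + 1 = 3
                        · simp [aGapAcc, hs1, hs2, hs3]
                        · have h0 : (bRun 0 t).1 ≠ 0 := by omega
                          simp [aGapAcc, hs1, hs2, hs3, h0]
                  · simp [aGapAcc, hz]
            · have hcz : aCountZeros (y :: t) = (0, y :: t) := by simp [aCountZeros, hy0]
              have hlt : (y :: t : List Int).length ≤ n := by
                simp only [List.length_cons] at hlen ⊢; omega
              simp only [aLoop2, hcz, eq_self_iff_true, if_true]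
              have hacc : aGapAcc (y :: t) 0 a b c = (a, b, c) := by simp [aGapAcc, hy]
              rw [hacc]
              rw [ih _ hlt]
              have h1 : bRun 1 (y :: t) = (0, y :: t) := by simp [bRun, hy]
              conv_rhs => rw [bRLE, h1]
              conv_rhs => rw [bRLE]
              conv_lhs => rw [bRLE]
              exact (bGaps_drop_one_head (0 + 1) hy0 _ _ a b c).symm
        · simp only [aLoop2, if_neg hx]
          have hlt : (y :: t : List Int).length ≤ n := by
            simp only [List.length_cons] at hlen ⊢; omega
          rw [ih _ hlt]
          conv_rhs => rw [bRLE]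
          rw [bGaps_skip hx]
          exact bGaps_dropRun hx (y :: t) a b c

-- ---------- B side ----------

theorem count_cons_int (xs : List Int) (x : Int) :
    (PySem.List.count (x :: xs) 1 : Int) = (if x = 1 then 1 else 0) + (PySem.List.count xs 1 : Int) := by
  simp [PySem.List.count, List.count_cons]
  split_ifs <;> omega

theorem bClose_ones (cv : Int) (cl : Nat) (d : Bool) (s : BState) :
    (bClose cv cl d s).ones = s.ones := by
  simp only [bClose]
  split_ifs <;> rfl

theorem bClose_set (cv : Int) (cl : Nat) (d : Bool) (a1 a2 a3 a4 a5 a6 a7 : Int) (o o' : Int)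
    (c c' : Option (Int × Nat)) (p : Bool) :
    { bClose cv cl d ⟨a1,a2,a3,a4,a5,a6,a7,o',c',p⟩ with cur := c, ones := o } =
      bClose cv cl d ⟨a1,a2,a3,a4,a5,a6,a7,o,c,p⟩ := by
  simp only [bClose]
  split_ifs <;> rfl

theorem bStep_grow (y v : Int) (l : Nat) (a1 a2 a3 a4 a5 a6 a7 o : Int) (p : Bool) (hy : y = v) :
    bStep ⟨a1,a2,a3,a4,a5,a6,a7,o,some (v,l),p⟩ y
      = ⟨a1,a2,a3,a4,a5,a6,a7,(if y = 1 then o+1 else o), some (v, l+1), p⟩ := by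
  subst hy
  unfold bStep
  by_cases h1 : y = 1
  · rw [if_pos h1]; dsimp only; rw [if_pos rfl]; simp [h1]
  · rw [if_neg h1]; dsimp only; rw [if_pos rfl]; simp [h1]

theorem bStep_close (y v : Int) (l : Nat) (a1 a2 a3 a4 a5 a6 a7 o : Int) (p : Bool) (hy : y ≠ v) :
    bStep ⟨a1,a2,a3,a4,a5,a6,a7,o,some (v,l),p⟩ y
      = { bClose v l (decide (y = 1)) ⟨a1,a2,a3,a4,a5,a6,a7,(if y = 1 then o+1 else o),some (v,l),p⟩
          with cur := some (y, 1) } := by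
  unfold bStep
  by_cases h1 : y = 1
  · rw [if_pos h1, if_pos h1]; dsimp only; rw [if_neg hy]
  · rw [if_neg h1, if_neg h1]; dsimp only; rw [if_neg hy]

theorem foldl_run : ∀ (t : List Int) (v : Int) (l : Nat) (s : BState), s.cur = some (v, l) →
    bFinish (List.foldl bStep s t) =
      runsFold { s with cur := none, ones := s.ones + (PySem.List.count t 1 : Int) }
        ((v, l + (bRun v t).1) :: bRLE (bRun v t).2) := by
  intro t
  induction t with
  | nil =>
      intro v l s hc
      obtain ⟨a1,a2,a3,a4,a5,a6,a7,o,c,p⟩ := s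
      simp only at hc; subst hc
      simp only [List.foldl_nil, bFinish, bRun, bRLE, runsFold, PySem.List.count,
        List.count_nil, Int.natCast_zero, Int.add_zero, Nat.add_zero]
      rw [show (bClose v l false ⟨a1,a2,a3,a4,a5,a6,a7,o,some (v,l),p⟩).ones = o from bClose_ones ..]
      exact bClose_set v l false a1 a2 a3 a4 a5 a6 a7 o o none (some (v,l)) p
  | cons y t' ih =>
      intro v l s hc
      obtain ⟨a1,a2,a3,a4,a5,a6,a7,o,c,p⟩ := s
      simp only at hc; subst hc
      simp only [List.foldl_cons]
      by_cases hy : y = v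
      · rw [bStep_grow y v l a1 a2 a3 a4 a5 a6 a7 o p hy, ih v (l+1) _ rfl]
        subst hy
        have hr : bRun y (y :: t') = ((bRun y t').1 + 1, (bRun y t').2) := by simp [bRun]
        rw [hr]
        simp only
        rw [count_cons_int]
        have hl : l + ((bRun y t').1 + 1) = (l + 1) + (bRun y t').1 := by omega
        rw [hl]
        congr 1
        simp only [BState.mk.injEq, and_true, true_and]
        split_ifs <;> omega
      · rw [bStep_close y v l a1 a2 a3 a4 a5 a6 a7 o p hy, ih y 1 _ rfl]
        have hr : bRun v (y :: t') = (0, y :: t') := by simp [bRun, hy]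
        rw [hr]
        simp only [Nat.add_zero]
        rw [show bRLE (y :: t') = (y, (bRun y t').1 + 1) :: bRLE (bRun y t').2 from by rw [bRLE]]
        conv_rhs => rw [runsFold]
        simp only [lookOne]
        rw [count_cons_int]
        rw [show (1 + (bRun y t').1) = ((bRun y t').1 + 1) from by omega]
        congr 1
        simp only [bClose]
        split_ifs <;> simp only [BState.mk.injEq] <;> norm_num <;> (try split_ifs) <;> omega

theorem fold_eq (xs : List Int) :
    bFinish (xs.foldl bStep ⟨0,0,0,0,0,0,0,0,none,false⟩) =
      runsFold ⟨0,0,0,0,0,0,0,(PySem.List.count xs 1 : Int),none,false⟩ (bRLE xs) := by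
  cases xs with
  | nil => simp [bFinish, runsFold, bRLE, PySem.List.count]
  | cons x t =>
      simp only [List.foldl_cons]
      have hstep : bStep ⟨0,0,0,0,0,0,0,0,none,false⟩ x
          = ⟨0,0,0,0,0,0,0,(if x = 1 then (1:Int) else 0), some (x,1), false⟩ := by
        by_cases h1 : x = 1 <;> simp [bStep, h1]
      rw [hstep, foldl_run t x 1 _ rfl]
      rw [show bRLE (x :: t) = (x, (bRun x t).1 + 1) :: bRLE (bRun x t).2 from by rw [bRLE]]
      rw [count_cons_int, Nat.add_comm 1 (bRun x t).1]

theorem runsFold_p1 : ∀ (runs : List (Int × Nat)) (s : BState),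
    ((runsFold s runs).vtc, (runsFold s runs).cp, (runsFold s runs).tp, (runsFold s runs).vt)
      = bPass1 runs s.vtc s.cp s.tp s.vt := by
  intro runs
  induction runs with
  | nil => intro s; simp [runsFold, bPass1]
  | cons r rest ih =>
      intro s
      obtain ⟨v, l⟩ := r
      rw [runsFold, bPass1, ih]
      by_cases hv : v = 1
      · subst hv
        simp only [if_pos rfl]
        by_cases h4 : l ≥ 4
        · simp [bClose, h4]
        · by_cases h3 : l = 3
          · simp [bClose, h4, h3]
          · by_cases h2 : l = 2
            · simp [bClose, h4, h3, h2]
            · simp [bClose, h4, h3, h2]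
      · simp only [if_neg hv]
        have h : ((bClose v l (lookOne rest) s).vtc, (bClose v l (lookOne rest) s).cp,
              (bClose v l (lookOne rest) s).tp, (bClose v l (lookOne rest) s).vt)
            = (s.vtc, s.cp, s.tp, s.vt) := by
          simp only [bClose]
          split_ifs <;> simp_all
        simp only [Prod.mk.injEq] at h
        rw [h.1, h.2.1, h.2.2.1, h.2.2.2]

theorem runsFold_p2 : ∀ (runs : List (Int × Nat)) (s : BState),
    ((runsFold s runs).bg, (runsFold s runs).tg, (runsFold s runs).qg)
      = bGapsP s.prevOne runs s.bg s.tg s.qg := by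
  intro runs
  induction runs with
  | nil => intro s; simp [runsFold, bGapsP]
  | cons r rest ih =>
      intro s
      obtain ⟨v, l⟩ := r
      rw [runsFold, bGapsP, ih]
      by_cases hcond : (s.prevOne && decide (v = 0) && lookOne rest) = true
      · have hv : v ≠ 1 := by
          simp only [Bool.and_eq_true, decide_eq_true_eq] at hcond
          omega
        rw [hcond]
        simp only [if_pos rfl]
        by_cases h1 : l = 1
        · simp [bClose, hv, hcond, h1]
        · by_cases h2 : l = 2
          · simp [bClose, hv, hcond, h1, h2]
          · by_cases h3 : l = 3
            · simp [bClose, hv, hcond, h1, h2, h3]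
            · simp [bClose, hv, hcond, h1, h2, h3]
      · have hcond' : (s.prevOne && decide (v = 0) && lookOne rest) = false := by
          simpa using hcond
        rw [hcond']
        simp only [Bool.false_eq_true, if_false]
        have h : ((bClose v l (lookOne rest) s).bg, (bClose v l (lookOne rest) s).tg,
              (bClose v l (lookOne rest) s).qg, (bClose v l (lookOne rest) s).prevOne)
            = (s.bg, s.tg, s.qg, decide (v = 1)) := by
          simp only [bClose]
          split_ifs <;> simp_all
        simp only [Prod.mk.injEq] at h
        rw [h.1, h.2.1, h.2.2.1, h.2.2.2]

theorem runsFold_ones : ∀ (runs : List (Int × Nat)) (s : BState), (runsFold s runs).ones = s.ones := by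
  intro runs
  induction runs with
  | nil => intro s; rfl
  | cons r rest ih =>
      intro s
      obtain ⟨v, l⟩ := r
      rw [runsFold, ih, bClose_ones]

-- bGapsP with a previous-run flag equals the triple-window bGaps
theorem gapsP_window : ∀ (runs : List (Int × Nat)) (v : Int) (l : Nat) (a b c : Int),
    bGapsP (decide (v = 1)) runs a b c = bGaps ((v, l) :: runs) a b c := by
  intro runs
  induction runs with
  | nil => intro v l a b c; cases hv : decide (v = 1) <;> simp [bGapsP, bGaps]
  | cons r2 rest ih =>
      intro v l a b c
      obtain ⟨w, m⟩ := r2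
      cases rest with
      | nil =>
          simp only [bGapsP, lookOne, Bool.and_false, Bool.false_eq_true, if_false]
          rfl
      | cons r3 rest' =>
          obtain ⟨u, q⟩ := r3
          rw [bGapsP]
          simp only [lookOne]
          rw [show bGaps ((v, l) :: (w, m) :: (u, q) :: rest') a b c
              = (if v = 1 ∧ w = 0 ∧ u = 1 then
                  (if m = 1 then bGaps ((w, m) :: (u, q) :: rest') (a+1) b c
                   else if m = 2 then bGaps ((w, m) :: (u, q) :: rest') a (b+1) c
                   else if m = 3 then bGaps ((w, m) :: (u, q) :: rest') a b (c+1)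
                   else bGaps ((w, m) :: (u, q) :: rest') a b c)
                 else bGaps ((w, m) :: (u, q) :: rest') a b c) from by rw [bGaps]]
          by_cases hcond : (decide (v = 1) && decide (w = 0) && decide (u = 1)) = true
          · have hp : v = 1 ∧ w = 0 ∧ u = 1 := by
              simp only [Bool.and_eq_true, decide_eq_true_eq] at hcond
              tauto
            rw [if_pos hcond, if_pos hp]
            split_ifs <;> rw [ih]
          · have hp : ¬ (v = 1 ∧ w = 0 ∧ u = 1) := by
              simp only [Bool.and_eq_true, decide_eq_true_eq] at hcond
              tauto
            rw [if_neg hcond, if_neg hp, ih]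

theorem gapsP_eq_gaps (xs : List Int) (a b c : Int) :
    bGapsP false (bRLE xs) a b c = bGaps (bRLE xs) a b c := by
  cases hx : bRLE xs with
  | nil => simp [bGapsP, bGaps]
  | cons r1 rest =>
      obtain ⟨v, l⟩ := r1
      rw [bGapsP]
      simp only [Bool.false_and, Bool.false_eq_true, if_false]
      exact gapsP_window rest v l a b c

-- ===== VERDICT (by name: the statement is the Claim_ definition above) =====
theorem PVC_CLASSIFICATION_spec : Claim_equal_PVC_CLASSIFICATION := by
  intro xs _
  unfold Spec_PVC_CLASSIFICATION PVC_CLASSIFICATION PVC_CLASSIFICATION_alt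
  rw [pass1_eq xs.length xs le_rfl, pass2_eq xs.length xs le_rfl, fold_eq]
  simp only
  have h1 := runsFold_p1 (bRLE xs) ⟨0,0,0,0,0,0,0,(PySem.List.count xs 1 : Int),none,false⟩
  have h2 := runsFold_p2 (bRLE xs) ⟨0,0,0,0,0,0,0,(PySem.List.count xs 1 : Int),none,false⟩
  have h3 := runsFold_ones (bRLE xs) ⟨0,0,0,0,0,0,0,(PySem.List.count xs 1 : Int),none,false⟩
  rw [gapsP_eq_gaps] at h2
  set S := runsFold ⟨0,0,0,0,0,0,0,(PySem.List.count xs 1 : Int),none,false⟩ (bRLE xs) with hS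
  set P := bPass1 (bRLE xs) 0 0 0 0 with hP
  set G := bGaps (bRLE xs) 0 0 0 with hG
  have e1 : S.vtc = P.1 := by rw [← h1]
  have e2 : S.cp = P.2.1 := by rw [← h1]
  have e3 : S.tp = P.2.2.1 := by rw [← h1]
  have e4 : S.vt = P.2.2.2 := by rw [← h1]
  have f1 : S.bg = G.1 := by rw [← h2]
  have f2 : S.tg = G.2.1 := by rw [← h2]
  have f3 : S.qg = G.2.2 := by rw [← h2]
  rw [e1, e2, e3, e4, f1, f2, f3, h3]
  have hmin : (if P.1 > 1 then (1:Int) else P.1) = min P.1 1 := by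
    by_cases h : P.1 > 1
    · rw [if_pos h, min_eq_right (by omega : (1:Int) ≤ P.1)]
    · rw [if_neg h, min_eq_left (by omega : P.1 ≤ 1)]
  rw [hmin]
  ring_nf
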